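-- pv_equiv track=rewrite | github.com/Mgs25/Edabit_Challenges | constructDes.py | construct_deconstruct
-- ===== SOURCE A (Python) =====
-- def construct_deconstruct(s):
-- 	i = 0
-- 	res = []
-- 	while i<len(s):
-- 		res.append(s[:i+1])
-- 		i+=1
-- 	i = i-1
-- 	while i > 0:
-- 		res.append(s[:i])
-- 		i -= 1
-- 	return res
-- ===== SOURCE B (Python) =====
-- def construct_deconstruct(s):
--     # Closed-form over output positions: the answer has 2n-1 entries and entry i
--     # is the prefix of length min(i, 2n-2-i) + 1 -- one direct pass, no second loop.
--     n = len(s)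
--     return [s[:min(i, 2 * n - 2 - i) + 1] for i in range(max(2 * n - 1, 0))]
-- ===== Notes on version B (the rewrite author's own statement) =====
-- stated objective: simpler
-- what changed: B replaces A's two sequential scanning loops by a single comprehension over the 2n-1 output positions, computing each entry's prefix length directly by the closed form min(i, 2n-2-i)+1.
import Mathlib
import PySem

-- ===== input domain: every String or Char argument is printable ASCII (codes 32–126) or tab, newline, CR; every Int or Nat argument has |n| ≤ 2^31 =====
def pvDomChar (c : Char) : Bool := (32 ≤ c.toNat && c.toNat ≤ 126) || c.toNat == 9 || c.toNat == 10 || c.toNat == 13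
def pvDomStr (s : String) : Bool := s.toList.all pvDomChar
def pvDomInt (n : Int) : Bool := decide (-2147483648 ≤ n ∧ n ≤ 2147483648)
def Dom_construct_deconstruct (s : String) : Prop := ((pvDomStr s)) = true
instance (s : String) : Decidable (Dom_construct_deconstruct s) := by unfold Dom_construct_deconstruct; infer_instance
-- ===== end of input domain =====

-- B replaces A's two scanning loops by a single map over the 2n-1 output positions with the
-- closed-form prefix length min(i, 2n-2-i)+1; same values proved for all strings.

-- ===== PORT A =====
-- first while loop: while i < len(s): res.append(s[:i+1]); i += 1
def cdLoop1 (s : String) (i : Int) (res : List String) : List String :=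
  if _h : i < PySem.Str.len s then
    cdLoop1 s (i + 1) (res ++ [PySem.Str.slice s none (some (i + 1))])
  else res
termination_by (PySem.Str.len s - i).toNat
decreasing_by omega

-- second while loop: while i > 0: res.append(s[:i]); i -= 1
def cdLoop2 (s : String) (i : Int) (res : List String) : List String :=
  if _h : 0 < i then
    cdLoop2 s (i - 1) (res ++ [PySem.Str.slice s none (some i)])
  else res
termination_by i.toNat
decreasing_by omega

def construct_deconstruct (s : String) : List String :=
  cdLoop2 s (PySem.Str.len s - 1) (cdLoop1 s 0 [])

-- ===== PORT B =====
-- single comprehension over output positions, transliterating Source B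
def construct_deconstruct_alt (s : String) : List String :=
  let n := PySem.Str.len s
  (PySem.List.pyRange 0 (max (2 * n - 1) 0) 1).map
    (fun i => PySem.Str.slice s none (some (min i (2 * n - 2 - i) + 1)))

-- ===== PRECONDITION & SPEC =====
def Spec_construct_deconstruct (s : String) (out : List String) : Prop := out = construct_deconstruct_alt s
instance (s : String) (out : List String) : Decidable (Spec_construct_deconstruct s out) := by unfold Spec_construct_deconstruct; infer_instance

-- ===== CLAIM =====
def Claim_equal_construct_deconstruct : Prop := ∀ (s : String), Dom_construct_deconstruct s → Spec_construct_deconstruct s (construct_deconstruct s)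

-- ===== LEMMAS AND PROOFS =====

-- prefixes of cs of lengths 1..m, as strings
def cdP (cs : List Char) (m : Nat) : List String :=
  (List.range m).map (fun i => String.ofList (cs.take (i + 1)))

-- canonical value: increasing prefixes then the mirror of all but the last
def cdW (cs : List Char) : List String :=
  cdP cs cs.length ++ (cdP cs (cs.length - 1)).reverse

theorem cdSlice_str (s : String) (j : Nat) :
    PySem.Str.slice s none (some (j : Int)) = String.ofList (s.toList.take j) := by
  apply String.toList_inj.mp
  rw [PySem.Str.toList_slice, PySem.Chars.slice_eq_listSlice, PySem.List.slice_to_natCast]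
  simp

theorem cdLoop1_eq (s : String) : ∀ (i : Int) (res : List String),
    cdLoop1 s i res
      = res ++ (PySem.List.pyRange (i + 1) (PySem.Str.len s + 1) 1).map
          (fun j => PySem.Str.slice s none (some j)) := by
  intro i res
  rw [cdLoop1]
  split_ifs with h
  · rw [cdLoop1_eq s (i + 1) _,
      PySem.List.pyRange_one_cons (a := i + 1) (b := PySem.Str.len s + 1) (by omega)]
    simp
  · rw [PySem.List.pyRange_one_eq_nil (by omega)]
    simp
termination_by i => (PySem.Str.len s - i).toNat
decreasing_by omega

theorem cdLoop2_eq (s : String) : ∀ (i : Int) (res : List String),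
    cdLoop2 s i res
      = res ++ (PySem.List.pyRange i 0 (-1)).map
          (fun j => PySem.Str.slice s none (some j)) := by
  intro i res
  rw [cdLoop2]
  split_ifs with h
  · rw [cdLoop2_eq s (i - 1) _, PySem.List.pyRange_neg_one_cons (a := i) (b := 0) (by omega)]
    simp
  · rw [PySem.List.pyRange_neg_one_eq_nil (by omega)]
    simp
termination_by i => i.toNat
decreasing_by omega

-- the map of prefixes over range(1, m+1) is cdP
theorem cdMap_eq (s : String) (m : Nat) :
    (PySem.List.pyRange 1 ((m : Int) + 1) 1).map (fun j => PySem.Str.slice s none (some j))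
      = cdP s.toList m := by
  rw [PySem.List.pyRange_one, cdP]
  have : ((m : Int) + 1 - 1).toNat = m := by omega
  rw [this, List.map_map]
  apply List.map_congr_left
  intro k _
  show PySem.Str.slice s none (some (1 + (k : Int))) = String.ofList (s.toList.take (k + 1))
  have : (1 + (k : Int)) = ((k + 1 : Nat) : Int) := by push_cast; ring
  rw [this, cdSlice_str]

theorem cdLen (s : String) : PySem.Str.len s = (s.toList.length : Int) := by
  simp

-- A's second loop yields the mirrored strict-prefix list
theorem cdDown_eq (s : String) (h : 0 < s.toList.length) :
    (PySem.List.pyRange ((s.toList.length : Int) - 1) 0 (-1)).map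
        (fun j => PySem.Str.slice s none (some j))
      = (cdP s.toList (s.toList.length - 1)).reverse := by
  rw [PySem.List.pyRange_neg_one_eq_reverse, List.map_reverse]
  congr 1
  have h2 : ((0 : Int) + 1) = 1 := by norm_num
  have h3 : (s.toList.length : Int) - 1 + 1 = ((s.toList.length - 1 : Nat) : Int) + 1 := by omega
  rw [h2, h3, cdMap_eq s (s.toList.length - 1)]

theorem cdA_eq (s : String) : construct_deconstruct s = cdW s.toList := by
  unfold construct_deconstruct
  rw [cdLoop2_eq, cdLoop1_eq, List.nil_append, cdLen]
  have h1 : (0 : Int) + 1 = 1 := by norm_num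
  rw [h1, cdMap_eq s s.toList.length, cdW]
  congr 1
  rcases Nat.eq_zero_or_pos s.toList.length with h | h
  · rw [h]
    rw [PySem.List.pyRange_neg_one_eq_nil (by omega)]
    simp [cdP]
  · exact cdDown_eq s h

theorem cdAlt_eq (s : String) : construct_deconstruct_alt s = cdW s.toList := by
  unfold construct_deconstruct_alt
  dsimp only
  rw [cdLen]
  rcases Nat.eq_zero_or_pos s.toList.length with h0 | h0
  · rw [h0]
    norm_num
    simp [cdW, cdP, h0]
  · have hmax : max (2 * (s.toList.length : Int) - 1) 0 = 2 * (s.toList.length : Int) - 1 := by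
      omega
    rw [hmax,
      PySem.List.pyRange_one_append 0 (s.toList.length : Int)
        (2 * (s.toList.length : Int) - 1) (by omega) (by omega),
      List.map_append, cdW]
    congr 1
    · -- increasing half: output positions 0..n-1
      rw [PySem.List.pyRange_one, List.map_map]
      have e : ((s.toList.length : Int) - 0).toNat = s.toList.length := by omega
      rw [e]
      unfold cdP
      apply List.map_congr_left
      intro k hk
      rw [List.mem_range] at hk
      show PySem.Str.slice s none
          (some (min (0 + (k : Int)) (2 * (s.toList.length : Int) - 2 - (0 + (k : Int))) + 1))
        = String.ofList (s.toList.take (k + 1))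
      have hmin : min (0 + (k : Int)) (2 * (s.toList.length : Int) - 2 - (0 + (k : Int))) + 1
          = ((k + 1 : Nat) : Int) := by omega
      rw [hmin, cdSlice_str]
    · -- mirrored half: output positions n..2n-2
      rw [← cdDown_eq s h0, PySem.List.pyRange_one, PySem.List.pyRange_neg_one,
        List.map_map, List.map_map]
      have e1 : (2 * (s.toList.length : Int) - 1 - (s.toList.length : Int)).toNat
          = s.toList.length - 1 := by omega
      have e2 : ((s.toList.length : Int) - 1 - 0).toNat = s.toList.length - 1 := by omega
      rw [e1, e2]
      apply List.map_congr_left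
      intro k hk
      rw [List.mem_range] at hk
      show PySem.Str.slice s none
          (some (min ((s.toList.length : Int) + k)
            (2 * (s.toList.length : Int) - 2 - ((s.toList.length : Int) + (k : Int))) + 1))
        = PySem.Str.slice s none (some ((s.toList.length : Int) - 1 - (k : Int)))
      congr 2
      omega

-- ===== VERDICT =====
theorem construct_deconstruct_spec : Claim_equal_construct_deconstruct := by
  intro s _
  unfold Spec_construct_deconstruct
  rw [cdA_eq, cdAlt_eq]
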